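-- pv_equiv track=rewrite | github.com/AlexClowes/advent_of_code | 2015/19/count.py | gen_symbols
-- ===== SOURCE A (Python) =====
-- def gen_symbols(molecule):
--     pos = 0
--     while pos < len(molecule):
--         if pos < len(molecule) - 1 and molecule[pos + 1].islower():
--             yield molecule[pos : pos + 2]
--             pos += 2
--         else:
--             yield molecule[pos]
--             pos += 1
-- ===== SOURCE B (Python) =====
-- def gen_symbols(molecule):
--     pending = ""
--     for c in molecule:
--         if pending and c.islower():
--             yield pending + c
--             pending = ""
--         else:
--             if pending:
--                 yield pending
--             pending = c
--     if pending:
--         yield pending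
-- ===== Notes on version B (the rewrite author's own statement) =====
-- stated objective: simpler
-- what changed: Replaced the index-based while-loop with lookahead (pos, len checks, subscripting and slicing) by a single forward iteration over the characters carrying a one-char pending buffer that is emitted alone or merged with a following lowercase letter.
import Mathlib
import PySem

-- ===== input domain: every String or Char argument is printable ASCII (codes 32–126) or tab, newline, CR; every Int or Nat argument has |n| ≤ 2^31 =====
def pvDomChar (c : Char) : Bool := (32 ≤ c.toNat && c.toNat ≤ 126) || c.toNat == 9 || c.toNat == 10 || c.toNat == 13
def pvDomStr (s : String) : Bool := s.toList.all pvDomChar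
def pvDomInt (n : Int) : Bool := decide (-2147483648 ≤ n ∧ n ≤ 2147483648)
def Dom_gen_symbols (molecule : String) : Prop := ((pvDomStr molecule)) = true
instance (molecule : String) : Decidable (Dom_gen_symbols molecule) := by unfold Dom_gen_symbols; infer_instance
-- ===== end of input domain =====

-- B replaces A's index/lookahead while-loop by a single forward pass with a one-char pending
-- buffer (objective: simpler). Char.isLower is exact for Python's str.islower on the ASCII domain.

-- ===== PORT A =====
-- literal port of A's while-loop: pos advances by 2 or 1; molecule[pos+1].islower() under the
-- short-circuited bound check; molecule[pos:pos+2] via PySem slice.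
def gen_symbols_loop (cs : List Char) (pos : Nat) : List String :=
  if h : pos < cs.length then
    if pos < cs.length - 1 && (cs.getD (pos + 1) default).isLower then
      String.ofList (PySem.List.slice cs (some (pos : Int)) (some ((pos : Int) + 2))) ::
        gen_symbols_loop cs (pos + 2)
    else
      String.ofList [cs[pos]] :: gen_symbols_loop cs (pos + 1)
  else []
termination_by cs.length - pos

def gen_symbols (molecule : String) : List String :=
  gen_symbols_loop molecule.toList 0

-- ===== PORT B =====
-- port of Source B: one foldl over the characters with state (tokens so far, pending char), then flush
def gen_symbols_alt_step (st : List String × Option Char) (c : Char) : List String × Option Char :=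
  match st with
  | (acc, some p) =>
      if c.isLower then (acc ++ [String.ofList [p, c]], none)
      else (acc ++ [String.ofList [p]], some c)
  | (acc, none) => (acc, some c)

def gen_symbols_alt (molecule : String) : List String :=
  match molecule.toList.foldl gen_symbols_alt_step ([], none) with
  | (acc, some p) => acc ++ [String.ofList [p]]
  | (acc, none) => acc

-- ===== PRECONDITION & SPEC =====
def Spec_gen_symbols (molecule : String) (out : List String) : Prop := out = gen_symbols_alt molecule
instance (molecule : String) (out : List String) : Decidable (Spec_gen_symbols molecule out) := by unfold Spec_gen_symbols; infer_instance

-- ===== CLAIM (what is proved, stated in full; the proofs are below) =====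
def Claim_equal_gen_symbols : Prop := ∀ (molecule : String), Dom_gen_symbols molecule → Spec_gen_symbols molecule (gen_symbols molecule)

-- ===== LEMMAS AND PROOFS =====

-- common structural description of the tokenization: a token is one char plus an optional lowercase follower
def tok : List Char → List String
  | [] => []
  | [c] => [String.ofList [c]]
  | c :: d :: rest =>
      if d.isLower then String.ofList [c, d] :: tok rest
      else String.ofList [c] :: tok (d :: rest)

lemma drop_two (cs : List Char) (pos : Nat) (h : pos + 1 < cs.length) :
    cs.drop pos = cs[pos] :: cs[pos+1] :: cs.drop (pos+2) := by
  rw [List.drop_eq_getElem_cons (by omega), List.drop_eq_getElem_cons h]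

lemma loop_eq_tok (cs : List Char) (pos : Nat) :
    gen_symbols_loop cs pos = tok (cs.drop pos) := by
  fun_induction gen_symbols_loop cs pos with
  | case1 pos h hcond ih =>
    simp only [Bool.and_eq_true, decide_eq_true_eq] at hcond
    obtain ⟨h1, h2⟩ := hcond
    have h1' : pos + 1 < cs.length := by omega
    rw [drop_two cs pos h1', tok]
    have hg : cs.getD (pos+1) default = cs[pos+1] := List.getD_eq_getElem _ _ h1'
    rw [hg] at h2
    have hsl : PySem.List.slice cs (some (pos:Int)) (some ((pos:Int)+2)) = [cs[pos], cs[pos+1]] := by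
      rw [show ((pos:Int)+2) = ((pos:Int) + ((2:Nat):Int)) by norm_num]
      rw [PySem.List.slice_natCast_add, drop_two cs pos h1']
      rfl
    rw [if_pos h2, ih, hsl]
  | case2 pos h hcond ih =>
    rw [List.drop_eq_getElem_cons h, ih]
    by_cases h2 : pos + 1 < cs.length
    · rw [List.drop_eq_getElem_cons h2, tok]
      simp only [Bool.and_eq_true, decide_eq_true_eq, not_and] at hcond
      have hnl := hcond (by omega)
      rw [List.getD_eq_getElem _ _ h2] at hnl
      rw [if_neg hnl]
    · have : cs.drop (pos+1) = [] := List.drop_eq_nil_of_le (by omega)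
      rw [this]
      rfl
  | case3 pos h =>
    rw [List.drop_eq_nil_of_le (by omega), tok]

lemma foldl_step_eq (l : List Char) (acc : List String) (p? : Option Char) :
    (match l.foldl gen_symbols_alt_step (acc, p?) with
      | (a, some p) => a ++ [String.ofList [p]]
      | (a, none) => a) =
    acc ++ (match p? with | none => tok l | some p => tok (p :: l)) := by
  induction l generalizing acc p? with
  | nil => cases p? <;> simp [tok]
  | cons c t ih =>
    cases p? with
    | none =>
      simp only [List.foldl_cons, gen_symbols_alt_step]
      exact ih acc (some c)
    | some p =>
      simp only [List.foldl_cons, gen_symbols_alt_step]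
      by_cases hl : c.isLower
      · rw [if_pos hl, ih]
        simp [tok, hl]
      · rw [if_neg hl, ih]
        simp [tok, hl]

-- ===== VERDICT (by name: the statement is the Claim_ definition above) =====
theorem gen_symbols_spec : Claim_equal_gen_symbols := by
  intro molecule _
  unfold Spec_gen_symbols gen_symbols gen_symbols_alt
  rw [loop_eq_tok]
  have h := foldl_step_eq molecule.toList [] none
  simp at h ⊢
  rw [h]
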